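-- pv_equiv track=rewrite | github.com/Nima155/Advent-of-Code | AOC2015/day17/day17-2.py | total_num_combinations
-- ===== SOURCE A (Python) =====
-- INPUT = [50,
-- 44,
-- 11,
-- 49,
-- 42,
-- 46,
-- 18,
-- 32,
-- 26,
-- 40,
-- 21,
-- 7,
-- 18,
-- 43,
-- 10,
-- 47,
-- 36,
-- 24,
-- 22,
-- 40]
--
-- def total_num_combinations(taken, visited, rem_turns):
--     if taken == 150:
--         return 1
--     if taken > 150 or rem_turns == 0:
--         return 0
--     ans = 0
--     for i, v in enumerate(INPUT):
--         if i not in visited: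
--             visited += (i, )
--             ans += total_num_combinations(taken + v, visited, rem_turns - 1)
--     return ans
-- ===== SOURCE B (Python) =====
-- INPUT = [50,
-- 44,
-- 11,
-- 49,
-- 42,
-- 46,
-- 18,
-- 32,
-- 26,
-- 40,
-- 21,
-- 7,
-- 18,
-- 43,
-- 10,
-- 47,
-- 36,
-- 24,
-- 22,
-- 40]
--
-- def total_num_combinations(taken, visited, rem_turns):
--     # Counts the subsets of the not-yet-visited INPUT indices whose values sum
--     # to 150 - taken, of size at most rem_turns (no size bound if rem_turns < 0),
--     # by a subset-sum DP over (size, sum) instead of A's branching recursion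
--     # over increasing index sequences.
--     vals = [v for i, v in enumerate(INPUT) if i not in visited]
--     target = 150 - taken
--     if target < 0 or sum(vals) < target:
--         return 0
--     n = len(vals)
--     # dp[k][s] = number of k-element subsets of the processed prefix summing to s
--     dp = [[1] + [0] * target] + [[0] * (target + 1) for _ in range(n)]
--     for v in vals:
--         dp = [dp[0]] + [[dp[k + 1][s] + (dp[k][s - v] if s >= v else 0)
--                          for s in range(target + 1)] for k in range(n)]
--     top = n if rem_turns < 0 else min(n, rem_turns)
--     return sum(dp[k][target] for k in range(top + 1))
-- ===== Notes on version B (the rewrite author's own statement) =====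
-- stated objective: alternative
-- what changed: replaces A's branching recursion over increasing index sequences with a (size,sum) subset-sum DP table over the unvisited values followed by a size-truncated row sum
import Mathlib
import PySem

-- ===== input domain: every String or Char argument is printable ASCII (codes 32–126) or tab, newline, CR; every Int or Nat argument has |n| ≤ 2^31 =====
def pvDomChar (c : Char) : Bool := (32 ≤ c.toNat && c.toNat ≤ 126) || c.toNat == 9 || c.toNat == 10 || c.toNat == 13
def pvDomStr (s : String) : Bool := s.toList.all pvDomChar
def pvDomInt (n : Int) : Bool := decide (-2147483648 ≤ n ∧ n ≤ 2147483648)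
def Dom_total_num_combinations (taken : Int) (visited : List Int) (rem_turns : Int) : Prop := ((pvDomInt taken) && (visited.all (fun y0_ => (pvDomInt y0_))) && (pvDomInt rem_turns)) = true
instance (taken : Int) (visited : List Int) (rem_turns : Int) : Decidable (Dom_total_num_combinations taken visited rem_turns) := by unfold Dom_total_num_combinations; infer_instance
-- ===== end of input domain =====

-- B computes the same count with a (size, sum) subset-sum DP table over the unvisited
-- values followed by a size-truncated row sum, instead of A's branching recursion.

-- ===== PORT A =====
def INPUT : List Int := [50, 44, 11, 49, 42, 46, 18, 32, 26, 40, 21, 7, 18, 43, 10, 47, 36, 24, 22, 40]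

-- Literal transliteration of A.  The recursion is made total by a fuel argument:
-- every recursive call adds one fresh index of 0..19 to `visited`, so the
-- recursion depth of the Python function is at most 21 and fuel 21 is never
-- exhausted.  The for-loop over enumerate(INPUT) is the foldl; Python's
-- `visited += (i,)` rebinds the frame-local tuple, hence the (ans, visited)
-- loop state threaded through the fold, and the updated tuple passed to the call.
def pvA : Nat → Int → List Int → Int → Int
  | 0, _, _, _ => 0
  | fuel+1, taken, visited, rem_turns =>
    if taken = 150 then 1
    else if 150 < taken ∨ rem_turns = 0 then 0
    else ((PySem.List.enumerate INPUT).foldl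
      (fun (st : Int × List Int) iv =>
        if !(st.2.contains iv.1) then
          (st.1 + pvA fuel (taken + iv.2) (st.2 ++ [iv.1]) (rem_turns - 1), st.2 ++ [iv.1])
        else st) (0, visited)).1

def total_num_combinations (taken : Int) (visited : List Int) (rem_turns : Int) : Int :=
  pvA 21 taken visited rem_turns

-- ===== PORT B =====
-- Transliteration of Source B.  List indexing dp[k][s] is by List.getD; all indices
-- are in range by construction (0 < v ≤ s in the guarded branch, so s - v.toNat
-- is exact for Python's dp[k][s-v]).
def total_num_combinations_alt (taken : Int) (visited : List Int) (rem_turns : Int) : Int :=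
  let vals := ((PySem.List.enumerate INPUT).filter (fun iv => !(visited.contains iv.1))).map (fun iv => iv.2)
  let target := 150 - taken
  if target < 0 ∨ vals.sum < target then 0
  else
    let n := vals.length
    let tN := target.toNat
    let dp0 : List (List Int) := ((1 : Int) :: List.replicate tN 0) :: List.replicate n (List.replicate (tN + 1) 0)
    let dp := vals.foldl (fun dp v =>
      dp.headD [] :: (List.range n).map (fun k =>
        (List.range (tN + 1)).map (fun s =>
          (dp.getD (k + 1) []).getD s 0 +
          (if v ≤ (s : Int) then (dp.getD k []).getD (s - v.toNat) 0 else 0)))) dp0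
    let top : Nat := if rem_turns < 0 then n else min n rem_turns.toNat
    ((List.range (top + 1)).map (fun k => (dp.getD k []).getD tN 0)).sum

-- ===== PRECONDITION & SPEC =====
def Spec_total_num_combinations (taken : Int) (visited : List Int) (rem_turns : Int) (out : Int) : Prop := out = total_num_combinations_alt taken visited rem_turns
instance (taken : Int) (visited : List Int) (rem_turns : Int) (out : Int) : Decidable (Spec_total_num_combinations taken visited rem_turns out) := by unfold Spec_total_num_combinations; infer_instance

-- ===== CLAIM (what is proved, stated in full; the proofs are below) =====
def Claim_equal_total_num_combinations : Prop := ∀ (taken : Int) (visited : List Int) (rem_turns : Int), Dom_total_num_combinations taken visited rem_turns → Spec_total_num_combinations taken visited rem_turns (total_num_combinations taken visited rem_turns)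

-- ===== LEMMAS AND PROOFS =====

-- fresh (not yet visited) entries of enumerate(INPUT), and their values
def fp (vis : List Int) : List (Int × Int) :=
  (PySem.List.enumerate INPUT).filter (fun iv => !(vis.contains iv.1))

def fvals (vis : List Int) : List Int := (fp vis).map (fun iv => iv.2)

-- cnt l k s = number of k-element sublists of l summing to s
def cnt : List Int → Nat → Int → Int
  | [], k, s => if k = 0 ∧ s = 0 then 1 else 0
  | _ :: l, 0, s => cnt l 0 s
  | v :: l, Nat.succ k, s => cnt l (k + 1) s + cnt l k (s - v)

-- the common mathematical value of both programs: subsets of any size k with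
-- k ≤ r (no bound if r < 0) summing to s
def W (l : List Int) (r s : Int) : Int :=
  ((List.range (l.length + 1)).map (fun (k : Nat) => if r < 0 ∨ (k : Int) ≤ r then cnt l k s else 0)).sum

-- the sum A's loop accumulates, one W-term per fresh position
def SS (t r : Int) : List Int → Int
  | [] => 0
  | v :: l => W l (r - 1) (150 - t - v) + SS t r l

lemma INPUT_pos : ∀ v ∈ INPUT, 0 < v := by decide

lemma fvals_pos (vis : List Int) : ∀ v ∈ fvals vis, 0 < v := by
  intro v hv
  simp only [fvals, List.mem_map] at hv
  obtain ⟨iv, hiv, rfl⟩ := hv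
  have h1 := List.mem_of_mem_filter hiv
  rw [PySem.List.mem_enumerate_iff] at h1
  obtain ⟨k, hk, rfl⟩ := h1
  exact INPUT_pos _ (List.getElem_mem hk)

lemma cnt_k0 (l : List Int) (s : Int) : cnt l 0 s = if s = 0 then 1 else 0 := by
  induction l with
  | nil => simp [cnt]
  | cons v l ih => simpa [cnt] using ih

lemma cnt_gt_len (l : List Int) : ∀ (k : Nat) (s : Int), l.length < k → cnt l k s = 0 := by
  induction l with
  | nil => intro k s h; simp at h; simp [cnt]; omega
  | cons v l ih =>
    intro k s h
    match k with
    | Nat.succ k' =>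
      simp only [cnt]
      rw [ih (k' + 1) s (by simp at h; omega), ih k' (s - v) (by simp at h; omega)]
      ring

lemma cnt_neg (l : List Int) : ∀ (k : Nat) (s : Int), (∀ v ∈ l, 0 < v) → s < 0 → cnt l k s = 0 := by
  induction l with
  | nil => intro k s _ hs; simp [cnt]; omega
  | cons v l ih =>
    intro k s hl hs
    have hv : 0 < v := hl v (by simp)
    have hl' : ∀ x ∈ l, 0 < x := fun x hx => hl x (by simp [hx])
    match k with
    | 0 => simpa [cnt] using ih 0 s hl' hs
    | Nat.succ k' =>
      simp only [cnt]
      rw [ih (k' + 1) s hl' hs, ih k' (s - v) hl' (by omega)]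
      ring

lemma cnt_pos_zero (l : List Int) : ∀ (k : Nat) (s : Int), (∀ v ∈ l, 0 < v) → s ≤ 0 → cnt l (k + 1) s = 0 := by
  induction l with
  | nil => intro k s _ _; simp [cnt]
  | cons v l ih =>
    intro k s hl hs
    have hv : 0 < v := hl v (by simp)
    have hl' : ∀ x ∈ l, 0 < x := fun x hx => hl x (by simp [hx])
    simp only [cnt]
    rw [ih k s hl' hs]
    match k with
    | 0 => rw [cnt_k0]; simp; omega
    | Nat.succ k'' => rw [ih k'' (s - v) hl' (by omega)]; ring

lemma cnt_big (l : List Int) : ∀ (k : Nat) (s : Int), (∀ v ∈ l, 0 < v) → l.sum < s → cnt l k s = 0 := by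
  induction l with
  | nil => intro k s _ hs; simp at hs; simp [cnt]; omega
  | cons v l ih =>
    intro k s hl hs
    have hv : 0 < v := hl v (by simp)
    have hl' : ∀ x ∈ l, 0 < x := fun x hx => hl x (by simp [hx])
    simp only [List.sum_cons] at hs
    have h1 : l.sum < s := by omega
    match k with
    | 0 => simpa [cnt] using ih 0 s hl' h1
    | Nat.succ k' =>
      simp only [cnt]
      rw [ih (k' + 1) s hl' h1, ih k' (s - v) hl' (by omega)]
      ring

lemma cnt_append (v : Int) : ∀ (l : List Int) (k : Nat) (s : Int),
    cnt (l ++ [v]) k s = cnt l k s + (match k with | 0 => 0 | Nat.succ k' => cnt l k' (s - v)) := by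
  intro l
  induction l with
  | nil =>
    intro k s
    match k with
    | 0 => simp [cnt]
    | Nat.succ k' => simp [cnt]
  | cons u l ih =>
    intro k s
    match k with
    | 0 => simpa [cnt] using ih 0 s
    | Nat.succ k' =>
      simp only [List.cons_append, cnt]
      rw [ih (k' + 1) s, ih k' (s - u)]
      match k' with
      | 0 => simp [cnt]; ring
      | Nat.succ k'' =>
        simp only [cnt]
        have : s - u - v = s - v - u := by ring
        rw [this]
        ring


lemma sum_range_map_zero (n : Nat) (f : Nat → Int) (h : ∀ k, k < n → f k = 0) :
    ((List.range n).map f).sum = 0 := by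
  apply List.sum_eq_zero
  intro x hx
  simp only [List.mem_map, List.mem_range] at hx
  obtain ⟨k, hk, rfl⟩ := hx
  exact h k hk

lemma sum_range_succ_map_head (n : Nat) (f : Nat → Int) (h : ∀ k, 0 < k → k < n + 1 → f k = 0) :
    ((List.range (n + 1)).map f).sum = f 0 := by
  rw [List.range_succ_eq_map, List.map_cons, List.map_map, List.sum_cons]
  have h0 : ((List.range n).map (f ∘ Nat.succ)).sum = 0 :=
    sum_range_map_zero n (f ∘ Nat.succ) (fun k hk => h (k + 1) (Nat.succ_pos k) (by omega))
  rw [h0]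
  ring

lemma W_s0 (l : List Int) (r : Int) (hl : ∀ v ∈ l, 0 < v) : W l r 0 = 1 := by
  unfold W
  rw [sum_range_succ_map_head]
  · have hc : (r < 0 ∨ ((0 : Nat) : Int) ≤ r) := by push_cast; omega
    rw [if_pos hc, cnt_k0]
    simp
  · intro k hk _
    match k, hk with
    | Nat.succ k', _ =>
      rw [cnt_pos_zero l k' 0 hl le_rfl]
      simp

lemma W_neg (l : List Int) (r s : Int) (hl : ∀ v ∈ l, 0 < v) (hs : s < 0) : W l r s = 0 := by
  unfold W
  apply sum_range_map_zero
  intro k _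
  rw [cnt_neg l k s hl hs]
  simp

lemma W_big (l : List Int) (r s : Int) (hl : ∀ v ∈ l, 0 < v) (hs : l.sum < s) : W l r s = 0 := by
  unfold W
  apply sum_range_map_zero
  intro k _
  rw [cnt_big l k s hl hs]
  simp

lemma W_r0 (l : List Int) (s : Int) (hs : s ≠ 0) : W l 0 s = 0 := by
  unfold W
  apply sum_range_map_zero
  intro k _
  rcases k with _ | k'
  · simp [cnt_k0, hs]
  · have hnc : ¬((0 : Int) < 0 ∨ ((k' + 1 : Nat) : Int) ≤ (0 : Int)) := by omega
    rw [if_neg hnc]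

lemma W_cons (v : Int) (l : List Int) (r s : Int) (hr : r ≠ 0) :
    W (v :: l) r s = W l (r - 1) (s - v) + W l r s := by
  unfold W
  simp only [List.length_cons]
  rw [List.range_succ_eq_map (n := l.length + 1), List.map_cons, List.map_map, List.sum_cons]
  have hstep : ∀ k ∈ List.range (l.length + 1),
      ((fun (k : Nat) => if r < 0 ∨ (k : Int) ≤ r then cnt (v :: l) k s else 0) ∘ Nat.succ) k =
      (fun (k : Nat) => (if r - 1 < 0 ∨ (k : Int) ≤ r - 1 then cnt l (k + 1) s else 0) +
                (if r - 1 < 0 ∨ (k : Int) ≤ r - 1 then cnt l k (s - v) else 0)) k := by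
    intro k _
    simp only [Function.comp, cnt]
    have hiff : (r < 0 ∨ ((Nat.succ k : Nat) : Int) ≤ r) ↔ (r - 1 < 0 ∨ (k : Int) ≤ r - 1) := by
      push_cast
      omega
    by_cases hC : (r - 1 < 0 ∨ (k : Int) ≤ r - 1)
    · rw [if_pos (hiff.mpr hC), if_pos hC, if_pos hC]
    · rw [if_neg (fun h => hC (hiff.mp h)), if_neg hC, if_neg hC]
      simp
  rw [List.map_congr_left hstep, PySem.List.sum_map_add_int]
  have hhead : (if r < 0 ∨ ((0 : Nat) : Int) ≤ r then cnt (v :: l) 0 s else 0) = cnt l 0 s := by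
    have hc : (r < 0 ∨ ((0 : Nat) : Int) ≤ r) := by push_cast; omega
    rw [if_pos hc]
    rfl
  rw [hhead]
  -- second summand is W l (r-1) (s-v) but with the shifted condition; first part recombines to W l r s
  have hA : ((List.range (l.length + 1)).map
        (fun (k : Nat) => if r - 1 < 0 ∨ (k : Int) ≤ r - 1 then cnt l (k + 1) s else 0)).sum
      = ((List.range (l.length + 1)).map
        (fun (k : Nat) => if r < 0 ∨ ((k + 1 : Nat) : Int) ≤ r then cnt l (k + 1) s else 0)).sum := by
    apply congrArg
    apply List.map_congr_left
    intro k _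
    have hiff : (r < 0 ∨ ((k + 1 : Nat) : Int) ≤ r) ↔ (r - 1 < 0 ∨ (k : Int) ≤ r - 1) := by
      push_cast
      omega
    by_cases hC : (r - 1 < 0 ∨ (k : Int) ≤ r - 1)
    · rw [if_pos hC, if_pos (hiff.mpr hC)]
    · rw [if_neg hC, if_neg (fun h => hC (hiff.mp h))]
  rw [hA]
  have hre : cnt l 0 s + ((List.range (l.length + 1)).map
        (fun (k : Nat) => if r < 0 ∨ ((k + 1 : Nat) : Int) ≤ r then cnt l (k + 1) s else 0)).sum
      = ((List.range (l.length + 1 + 1)).map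
        (fun (k : Nat) => if r < 0 ∨ (k : Int) ≤ r then cnt l k s else 0)).sum := by
    conv_rhs => rw [List.range_succ_eq_map (n := l.length + 1)]
    rw [List.map_cons, List.map_map, List.sum_cons]
    have hc : (r < 0 ∨ ((0 : Nat) : Int) ≤ r) := by push_cast; omega
    rw [if_pos hc]
    congr 1
  have hlast : ((List.range (l.length + 1 + 1)).map
        (fun (k : Nat) => if r < 0 ∨ (k : Int) ≤ r then cnt l k s else 0)).sum
      = ((List.range (l.length + 1)).map
        (fun (k : Nat) => if r < 0 ∨ (k : Int) ≤ r then cnt l k s else 0)).sum := by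
    rw [List.range_succ, List.map_append, List.sum_append]
    simp only [List.map_cons, List.map_nil, List.sum_cons, List.sum_nil]
    rw [cnt_gt_len l (l.length + 1) s (by omega)]
    simp
  calc cnt l 0 s +
        (((List.range (l.length + 1)).map
          (fun (k : Nat) => if r < 0 ∨ ((k + 1 : Nat) : Int) ≤ r then cnt l (k + 1) s else 0)).sum +
        ((List.range (l.length + 1)).map
          (fun (k : Nat) => if r - 1 < 0 ∨ (k : Int) ≤ r - 1 then cnt l k (s - v) else 0)).sum)
      = (cnt l 0 s + ((List.range (l.length + 1)).map
          (fun (k : Nat) => if r < 0 ∨ ((k + 1 : Nat) : Int) ≤ r then cnt l (k + 1) s else 0)).sum) +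
        ((List.range (l.length + 1)).map
          (fun (k : Nat) => if r - 1 < 0 ∨ (k : Int) ≤ r - 1 then cnt l k (s - v) else 0)).sum := by ring
    _ = ((List.range (l.length + 1)).map
          (fun (k : Nat) => if r - 1 < 0 ∨ (k : Int) ≤ r - 1 then cnt l k (s - v) else 0)).sum +
        ((List.range (l.length + 1)).map
          (fun (k : Nat) => if r < 0 ∨ (k : Int) ≤ r then cnt l k s else 0)).sum := by
        rw [hre, hlast]; ring

lemma SS_eq_W (t r : Int) (l : List Int) (hs : 150 - t ≠ 0) (hr : r ≠ 0) :
    SS t r l = W l r (150 - t) := by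
  induction l with
  | nil => simp [SS, W, cnt, hs]
  | cons v l ih =>
    simp only [SS, ih]
    rw [W_cons v l r (150 - t) hr]

lemma fp_append (vis : List Int) (x : Int) :
    fp (vis ++ [x]) = (fp vis).filter (fun iv => !(iv.1 == x)) := by
  unfold fp
  rw [List.filter_filter]
  apply List.filter_congr
  intro iv _
  by_cases h1 : iv.1 ∈ vis <;> by_cases h2 : iv.1 = x <;> simp [h1, h2]

lemma loopAux (f : Nat) (t r : Int)
    (IH : ∀ (t' : Int) (vis' : List Int) (r' : Int), (fp vis').length < f →
      pvA f t' vis' r' = W (fvals vis') r' (150 - t')) :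
    ∀ (ys : List Int) (a : Int) (vis : List Int) (ans : Int),
      fp vis = (PySem.List.enumerate ys a).filter (fun iv => !(vis.contains iv.1)) →
      (fp vis).length ≤ f →
      ((PySem.List.enumerate ys a).foldl
        (fun (st : Int × List Int) iv =>
          if !(st.2.contains iv.1) then
            (st.1 + pvA f (t + iv.2) (st.2 ++ [iv.1]) (r - 1), st.2 ++ [iv.1])
          else st) (ans, vis)).1 = ans + SS t r (fvals vis) := by
  intro ys
  induction ys with
  | nil =>
    intro a vis ans hfp _
    rw [PySem.List.enumerate_nil] at hfp ⊢
    simp only [List.filter_nil] at hfp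
    simp [fvals, hfp, SS]
  | cons y ys' ih =>
    intro a vis ans hfp hlen
    rw [PySem.List.enumerate_cons] at hfp ⊢
    rw [List.filter_cons] at hfp
    by_cases hc : vis.contains a = true
    · -- index a already visited: loop skips this entry
      have hb : (!vis.contains (a, y).1) = false := by dsimp only; rw [hc]; rfl
      rw [hb, if_neg (by simp)] at hfp
      rw [List.foldl_cons]
      have hstep : (if (!((ans, vis).2.contains (a, y).1)) = true then
          ((ans, vis).1 + pvA f (t + (a, y).2) ((ans, vis).2 ++ [(a, y).1]) (r - 1), (ans, vis).2 ++ [(a, y).1])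
          else (ans, vis)) = (ans, vis) := by
        dsimp only
        rw [hb]
        exact if_neg (by simp)
      rw [hstep]
      exact ih (a + 1) vis ans hfp hlen
    · -- fresh index a: consume it
      have hc' : vis.contains a = false := Bool.eq_false_iff.mpr hc
      have hb : (!vis.contains (a, y).1) = true := by dsimp only; rw [hc']; rfl
      rw [hb, if_pos rfl] at hfp
      have hTne : ∀ iv ∈ (PySem.List.enumerate ys' (a + 1)).filter
          (fun iv => !(vis.contains iv.1)), iv.1 ≠ a := by
        intro iv hiv
        have h1 := List.mem_of_mem_filter hiv
        rw [PySem.List.mem_enumerate_iff] at h1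
        obtain ⟨k, _, rfl⟩ := h1
        simp only
        omega
      set T := (PySem.List.enumerate ys' (a + 1)).filter (fun iv => !(vis.contains iv.1)) with hT
      have hF1 : fp (vis ++ [a]) = T := by
        rw [fp_append, hfp, List.filter_cons]
        have hhd : (!((a, y).1 == a)) = false := by simp
        rw [hhd, if_neg (by simp)]
        apply List.filter_eq_self.mpr
        intro iv hiv
        simp [hTne iv hiv]
      have hH' : fp (vis ++ [a]) =
          (PySem.List.enumerate ys' (a + 1)).filter (fun iv => !((vis ++ [a]).contains iv.1)) := by
        rw [hF1]
        have hff : (PySem.List.enumerate ys' (a + 1)).filter (fun iv => !((vis ++ [a]).contains iv.1)) =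
            T.filter (fun iv => !(iv.1 == a)) := by
          rw [hT, List.filter_filter]
          apply List.filter_congr
          intro iv _
          by_cases h1 : iv.1 ∈ vis <;> by_cases h2 : iv.1 = a <;> simp [h1, h2]
        rw [hff]
        symm
        apply List.filter_eq_self.mpr
        intro iv hiv
        simp [hTne iv hiv]
      have hlenT : T.length + 1 ≤ f := by
        have h2 := hlen
        rw [hfp] at h2
        simpa using h2
      rw [List.foldl_cons]
      have hstep : (if (!((ans, vis).2.contains (a, y).1)) = true then
          ((ans, vis).1 + pvA f (t + (a, y).2) ((ans, vis).2 ++ [(a, y).1]) (r - 1), (ans, vis).2 ++ [(a, y).1])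
          else (ans, vis)) =
          (ans + pvA f (t + y) (vis ++ [a]) (r - 1), vis ++ [a]) := by
        dsimp only
        rw [hb]
        exact if_pos rfl
      rw [hstep]
      rw [ih (a + 1) (vis ++ [a]) (ans + pvA f (t + y) (vis ++ [a]) (r - 1)) hH'
        (by rw [hF1]; omega)]
      rw [IH (t + y) (vis ++ [a]) (r - 1) (by rw [hF1]; omega)]
      have hfv1 : fvals (vis ++ [a]) = T.map (fun iv => iv.2) := by rw [fvals, hF1]
      have hfv2 : fvals vis = y :: T.map (fun iv => iv.2) := by
        rw [fvals, hfp, List.map_cons]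
      rw [hfv1, hfv2, SS]
      have harg : 150 - (t + y) = 150 - t - y := by ring
      rw [harg]
      ring

lemma mainA (f : Nat) : ∀ (t : Int) (vis : List Int) (r : Int),
    (fp vis).length < f → pvA f t vis r = W (fvals vis) r (150 - t) := by
  induction f with
  | zero => intro t vis r h; exact absurd h (Nat.not_lt_zero _)
  | succ f ih =>
    intro t vis r h
    simp only [pvA]
    by_cases h150 : t = 150
    · rw [if_pos h150]
      subst h150
      norm_num
      exact (W_s0 _ _ (fvals_pos vis)).symm
    · rw [if_neg h150]
      by_cases hg : 150 < t ∨ r = 0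
      · rw [if_pos hg]
        rcases hg with hgt | hr0
        · exact (W_neg _ _ _ (fvals_pos vis) (by omega)).symm
        · subst hr0
          exact (W_r0 _ _ (by omega)).symm
      · rw [if_neg hg]
        push_neg at hg
        rw [loopAux f t r (fun t' vis' r' h' => ih t' vis' r' h') INPUT 0 vis 0 rfl (by omega)]
        rw [SS_eq_W t r _ (by omega) hg.2]
        ring

-- ===== B side =====

def tbl (n tN : Nat) (p : List Int) : List (List Int) :=
  (List.range (n + 1)).map (fun (k : Nat) => (List.range (tN + 1)).map (fun (s : Nat) => cnt p k (s : Int)))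

lemma tbl_nil (n tN : Nat) :
    tbl n tN [] = ((1 : Int) :: List.replicate tN 0) :: List.replicate n (List.replicate (tN + 1) 0) := by
  apply List.ext_getElem
  · simp [tbl]
  · intro i h1 h2
    simp only [tbl, List.length_map, List.length_range] at h1
    simp only [tbl, List.getElem_map, List.getElem_range]
    rcases i with _ | i
    · simp only [List.getElem_cons_zero]
      apply List.ext_getElem
      · simp
      · intro j hj1 hj2
        simp only [List.getElem_map, List.getElem_range]
        rcases j with _ | j
        · simp [cnt]
        · simp only [List.getElem_cons_succ, List.getElem_replicate]
          simp [cnt]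
          omega
    · simp only [List.getElem_cons_succ, List.getElem_replicate]
      apply List.ext_getElem
      · simp
      · intro j hj1 hj2
        simp only [List.getElem_map, List.getElem_range, List.getElem_replicate]
        simp [cnt]

lemma tbl_step (n tN : Nat) (p : List Int) (v : Int) (hp : ∀ x ∈ p, 0 < x) (hv : 0 < v) :
    (tbl n tN p).headD [] :: (List.range n).map (fun k =>
      (List.range (tN + 1)).map (fun s =>
        ((tbl n tN p).getD (k + 1) []).getD s 0 +
        (if v ≤ (s : Int) then ((tbl n tN p).getD k []).getD (s - v.toNat) 0 else 0)))
    = tbl n tN (p ++ [v]) := by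
  conv_rhs => rw [tbl, List.range_succ_eq_map (n := n), List.map_cons, List.map_map]
  congr 1
  · -- head row: k = 0
    rw [tbl, List.range_succ_eq_map (n := n), List.map_cons]
    simp only [List.headD_cons]
    apply List.map_congr_left
    intro s _
    simp [cnt_append]
  · -- rows k+1
    apply List.map_congr_left
    intro k hk
    simp only [List.mem_range] at hk
    simp only [Function.comp]
    apply List.map_congr_left
    intro s hs
    simp only [List.mem_range] at hs
    have hrow1 : (tbl n tN p).getD (k + 1) [] =
        (List.range (tN + 1)).map (fun (s : Nat) => cnt p (k + 1) (s : Int)) := by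
      rw [tbl]
      exact PySem.List.getD_map_range _ _ _ _ (by omega)
    have hrow0 : (tbl n tN p).getD k [] =
        (List.range (tN + 1)).map (fun (s : Nat) => cnt p k (s : Int)) := by
      rw [tbl]
      exact PySem.List.getD_map_range _ _ _ _ (by omega)
    rw [hrow1, hrow0]
    rw [PySem.List.getD_map_range _ _ _ _ (by omega : s < tN + 1)]
    have hca : cnt (p ++ [v]) (k + 1) (s : Int) = cnt p (k + 1) (s : Int) + cnt p k ((s : Int) - v) := by
      simpa using cnt_append v p (k + 1) (s : Int)
    rw [hca]
    by_cases hvs : v ≤ (s : Int)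
    · rw [if_pos hvs]
      have hts : v.toNat ≤ s := Int.toNat_le.mpr hvs
      rw [PySem.List.getD_map_range _ _ _ _ (by omega : s - v.toNat < tN + 1)]
      have hcast : ((s - v.toNat : Nat) : Int) = (s : Int) - v := by
        rw [Nat.cast_sub hts, Int.toNat_of_nonneg (le_of_lt hv)]
      rw [hcast]
    · rw [if_neg hvs]
      rw [cnt_neg p k ((s : Int) - v) hp (by omega)]

lemma tbl_fold (n tN : Nat) : ∀ (l p : List Int), (∀ x ∈ l, 0 < x) → (∀ x ∈ p, 0 < x) →
    l.foldl (fun dp v =>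
      dp.headD [] :: (List.range n).map (fun k =>
        (List.range (tN + 1)).map (fun s =>
          (dp.getD (k + 1) []).getD s 0 +
          (if v ≤ (s : Int) then (dp.getD k []).getD (s - v.toNat) 0 else 0)))) (tbl n tN p)
    = tbl n tN (p ++ l) := by
  intro l
  induction l with
  | nil => intro p _ _; simp
  | cons v l ih =>
    intro p hl hp
    have hv : 0 < v := hl v (by simp)
    have hl' : ∀ x ∈ l, 0 < x := fun x hx => hl x (by simp [hx])
    have hp' : ∀ x ∈ p ++ [v], 0 < x := by
      intro x hx; rcases List.mem_append.1 hx with h | h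
      · exact hp x h
      · simp at h; omega
    simp only [List.foldl_cons]
    rw [tbl_step n tN p v hp hv, ih (p ++ [v]) hl' hp', List.append_assoc]
    rfl

lemma sum_trunc (l : List Int) (r s : Int) :
    ((List.range ((if r < 0 then l.length else min l.length r.toNat) + 1)).map
      (fun k => cnt l k s)).sum = W l r s := by
  by_cases hr : r < 0
  · rw [if_pos hr]
    unfold W
    apply congrArg
    apply List.map_congr_left
    intro k _
    rw [if_pos (Or.inl hr)]
  · rw [if_neg hr]
    push_neg at hr
    by_cases hn : l.length ≤ r.toNat
    · rw [min_eq_left hn]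
      unfold W
      apply congrArg
      apply List.map_congr_left
      intro k hk
      simp only [List.mem_range] at hk
      have hcl : (k : Int) ≤ r := by
        have h1 : k ≤ r.toNat := by omega
        have h2 := Int.toNat_of_nonneg hr
        omega
      rw [if_pos (Or.inr hcl)]
    · push_neg at hn
      rw [min_eq_right (by omega : r.toNat ≤ l.length)]
      have hz : ((List.map (fun x => r.toNat + 1 + x) (List.range (l.length - r.toNat))).map
          (fun (k : Nat) => if r < 0 ∨ (k : Int) ≤ r then cnt l k s else 0)).sum = 0 := by
        apply List.sum_eq_zero
        intro x hx
        simp only [List.map_map, List.mem_map, List.mem_range, Function.comp] at hx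
        obtain ⟨i, _, rfl⟩ := hx
        rw [if_neg]
        intro hcon
        rcases hcon with h1 | h2
        · omega
        · have h2' := Int.toNat_of_nonneg hr
          push_cast at h2
          omega
      have hW : W l r s = ((List.range (r.toNat + 1)).map
          (fun (k : Nat) => if r < 0 ∨ (k : Int) ≤ r then cnt l k s else 0)).sum := by
        unfold W
        have hsplit : l.length + 1 = (r.toNat + 1) + (l.length - r.toNat) := by omega
        rw [hsplit, List.range_add, List.map_append, List.sum_append, hz]
        ring
      rw [hW]
      apply congrArg
      apply List.map_congr_left
      intro k hk
      simp only [List.mem_range] at hk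
      have hcl : (k : Int) ≤ r := by
        have h2 := Int.toNat_of_nonneg hr
        omega
      rw [if_pos (Or.inr hcl)]

lemma altW (taken : Int) (vis : List Int) (rem_turns : Int) :
    total_num_combinations_alt taken vis rem_turns = W (fvals vis) rem_turns (150 - taken) := by
  unfold total_num_combinations_alt
  have hvals : ((PySem.List.enumerate INPUT).filter (fun iv => !(vis.contains iv.1))).map
      (fun iv => iv.2) = fvals vis := rfl
  simp only [hvals]
  by_cases hb : 150 - taken < 0 ∨ (fvals vis).sum < 150 - taken
  · rw [if_pos hb]
    rcases hb with h1 | h2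
    · exact (W_neg _ _ _ (fvals_pos vis) h1).symm
    · exact (W_big _ _ _ (fvals_pos vis) h2).symm
  · rw [if_neg hb]
    push_neg at hb
    obtain ⟨h0, _⟩ := hb
    have hdp0 : ((1 : Int) :: List.replicate (150 - taken).toNat 0) ::
        List.replicate (fvals vis).length (List.replicate ((150 - taken).toNat + 1) 0) =
        tbl (fvals vis).length (150 - taken).toNat [] := (tbl_nil _ _).symm
    rw [hdp0]
    rw [tbl_fold _ _ (fvals vis) [] (fvals_pos vis) (by simp)]
    simp only [List.nil_append]
    have htN : (((150 - taken).toNat : Nat) : Int) = 150 - taken := Int.toNat_of_nonneg (by omega)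
    have hmc : (List.range ((if rem_turns < 0 then (fvals vis).length
          else min (fvals vis).length rem_turns.toNat) + 1)).map
        (fun k => ((tbl (fvals vis).length (150 - taken).toNat (fvals vis)).getD k []).getD
          (150 - taken).toNat 0) =
        (List.range ((if rem_turns < 0 then (fvals vis).length
          else min (fvals vis).length rem_turns.toNat) + 1)).map
        (fun k => cnt (fvals vis) k (150 - taken)) := by
      apply List.map_congr_left
      intro k hk
      simp only [List.mem_range] at hk
      have hkb : k < (fvals vis).length + 1 := by
        by_cases hrt : rem_turns < 0
        · rw [if_pos hrt] at hk; omega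
        · rw [if_neg hrt] at hk
          have := min_le_left (fvals vis).length rem_turns.toNat
          omega
      rw [tbl, PySem.List.getD_map_range _ _ _ _ hkb,
        PySem.List.getD_map_range _ _ _ _ (by omega : (150 - taken).toNat < (150 - taken).toNat + 1),
        htN]
    rw [hmc]
    exact sum_trunc (fvals vis) rem_turns (150 - taken)

-- ===== VERDICT (by name: the statement is the Claim_ definition above) =====
theorem total_num_combinations_spec : Claim_equal_total_num_combinations := by
  intro taken visited rem_turns _
  unfold Spec_total_num_combinations
  rw [altW]
  have hlen : (fp visited).length < 21 := by
    have h1 : (fp visited).length ≤ (PySem.List.enumerate INPUT (0:Int)).length :=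
      List.length_filter_le _ _
    rw [PySem.List.length_enumerate] at h1
    simp only [INPUT] at h1
    simp at h1
    omega
  exact mainA 21 taken visited rem_turns hlen
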